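-- pv_equiv track=rewrite | github.com/robinjsu/CS585-Crypto-Cipher-Project | Cipher Project/util.py | whitening
-- ===== SOURCE A (Python) =====
-- def getWords(block):
--     words = [0,0,0,0]
--     remainder = block
--     for i in range(4):
--         word = remainder % (16 ** 4)
--         # insert into array starting from low order bits
--         words[3-i] = word
--         remainder //= (16 ** 4)
--     return words
--
-- def whitening(block, key):
--     rVals = []
--     words = getWords(block)
--     whiteningKey = key // (16 ** 4)
--     keyWords = getWords(whiteningKey)
--     for word in range(len(words)):
--         rVals.append(words[word] ^ keyWords[word])
--
--     return rVals
-- ===== SOURCE B (Python) =====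
-- def whitening(block, key):
--     v = block ^ (key >> 16)
--     return [(v >> s) & 0xFFFF for s in (48, 32, 16, 0)]
-- ===== Notes on version B (the rewrite author's own statement) =====
-- stated objective: simpler
-- what changed: B replaces the two 4-word splitting passes (getWords on block and on the shifted key) plus the explicit pairwise-XOR loop by a single integer XOR of block with key>>16 followed by one shift-and-mask extraction of the four words, relying on XOR commuting with bit slicing.
import Mathlib
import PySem

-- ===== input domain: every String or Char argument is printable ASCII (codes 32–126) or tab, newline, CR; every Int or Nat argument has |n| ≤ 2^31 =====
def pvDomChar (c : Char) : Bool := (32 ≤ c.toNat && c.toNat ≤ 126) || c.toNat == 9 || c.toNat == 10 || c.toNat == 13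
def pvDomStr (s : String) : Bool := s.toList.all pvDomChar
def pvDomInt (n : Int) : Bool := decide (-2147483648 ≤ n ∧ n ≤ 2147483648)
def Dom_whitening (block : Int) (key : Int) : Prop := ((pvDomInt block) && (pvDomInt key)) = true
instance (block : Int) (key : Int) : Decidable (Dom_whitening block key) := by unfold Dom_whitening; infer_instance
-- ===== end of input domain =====

-- B replaces the two word-splitting passes plus the pairwise-XOR loop by one integer XOR
-- followed by a single shift-and-mask word extraction (objective: simpler).

-- ===== PORT A =====
-- getWords: fixed array of 4 words filled by index assignment while dividing the remainder.
-- The index 3-i is always in {0,1,2,3} here, so Lean's List.set is exact for Python's words[3-i] = word.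
def getWordsA (block : Int) : List Int :=
  (PySem.List.pyRange 0 4 1).foldl
    (fun (st : List Int × Int) i =>
      let word := PySem.Int.mod st.2 65536
      (st.1.set (3 - i).toNat word, PySem.Int.floordiv st.2 65536))
    ([0, 0, 0, 0], block) |>.1

def whitening (block : Int) (key : Int) : List Int :=
  let words := getWordsA block
  let whiteningKey := PySem.Int.floordiv key 65536
  let keyWords := getWordsA whiteningKey
  -- words[word] / keyWords[word]: word ranges over 0..3, always in range, so getD 0 is exact
  (PySem.List.pyRange 0 words.length 1).foldl
    (fun rVals word =>
      rVals ++ [PySem.Int.bxor (PySem.List.pyGetD words word 0) (PySem.List.pyGetD keyWords word 0)])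
    []

-- ===== PORT B =====
def whitening_alt (block : Int) (key : Int) : List Int :=
  let v := PySem.Int.bxor block (key >>> (16 : Nat))
  [48, 32, 16, 0].map (fun s : Nat => PySem.Int.band (v >>> s) 65535)

-- ===== PRECONDITION & SPEC =====
def Spec_whitening (block : Int) (key : Int) (out : List Int) : Prop := out = whitening_alt block key
instance (block : Int) (key : Int) (out : List Int) : Decidable (Spec_whitening block key out) := by unfold Spec_whitening; infer_instance

-- ===== CLAIM (what is proved, stated in full; the proofs are below) =====
def Claim_equal_whitening : Prop := ∀ (block : Int) (key : Int), Dom_whitening block key → Spec_whitening block key (whitening block key)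

-- ===== LEMMAS AND PROOFS =====

-- Nat-level bitwise facts
theorem nat_xor_div_pow (x y k : Nat) : (x ^^^ y) / 2 ^ k = x / 2 ^ k ^^^ y / 2 ^ k := by
  apply Nat.eq_of_testBit_eq; intro i
  simp [← Nat.shiftRight_eq_div_pow, Nat.testBit_shiftRight, Nat.testBit_xor]

theorem nat_not_pow (k : Nat) : ∀ u : Nat, u < 2 ^ k → (2 ^ k - 1) ^^^ u = 2 ^ k - 1 - u := by
  induction k with
  | zero => intro u hu; interval_cases u; decide
  | succ k ih =>
    intro u hu
    have hpow : (0:Nat) < 2 ^ k := Nat.two_pow_pos k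
    have hdiv : ((2 ^ (k+1) - 1) ^^^ u) / 2 ^ 1 = 2 ^ k - 1 - u / 2 := by
      rw [nat_xor_div_pow]
      have h1 : (2 ^ (k+1) - 1) / 2 ^ 1 = 2 ^ k - 1 := by
        have : 2 ^ (k+1) = 2 * 2 ^ k := by ring
        omega
      have h2 : u / 2 ^ 1 = u / 2 := by norm_num
      rw [h1, h2, ih (u / 2) (by omega)]
    have hmod : ((2 ^ (k+1) - 1) ^^^ u) % 2 ^ 1 = 1 - u % 2 := by
      rw [Nat.xor_mod_two_pow]
      have h1 : (2 ^ (k+1) - 1) % 2 ^ 1 = 1 := by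
        have : 2 ^ (k+1) = 2 * 2 ^ k := by ring
        omega
      have h2 : u % 2 ^ 1 = u % 2 := by norm_num
      rw [h1, h2]
      rcases Nat.mod_two_eq_zero_or_one u with h | h <;> rw [h] <;> decide
    have hrec := Nat.div_add_mod ((2 ^ (k+1) - 1) ^^^ u) (2 ^ 1)
    have : 2 ^ (k+1) = 2 * 2 ^ k := by ring
    omega

theorem nat_not16 (u : Nat) (h : u < 65536) : 65535 ^^^ u = 65535 - u := by
  have := nat_not_pow 16 u (by omega)
  norm_num at this
  omega

-- bxor on the four sign shapes (every Int is ↑u or -↑u - 1)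
theorem bxor_nn (u v : Nat) : PySem.Int.bxor (u : Int) (v : Int) = ((u ^^^ v : Nat) : Int) :=
  PySem.Int.bxor_natCast u v

theorem bxor_np (u v : Nat) :
    PySem.Int.bxor (u : Int) (-(v : Int) - 1) = -((u ^^^ v : Nat) : Int) - 1 := by
  unfold PySem.Int.bxor
  rw [if_pos (by positivity), if_neg (by omega)]
  have e1 : ((u : Int)).toNat = u := Int.toNat_natCast u
  have e2 : (-(-(v : Int) - 1) - 1).toNat = v := by omega
  rw [e1, e2]

theorem bxor_pn (u v : Nat) :
    PySem.Int.bxor (-(u : Int) - 1) (v : Int) = -((u ^^^ v : Nat) : Int) - 1 := by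
  unfold PySem.Int.bxor
  rw [if_neg (by omega), if_pos (by positivity)]
  have e1 : ((v : Int)).toNat = v := Int.toNat_natCast v
  have e2 : (-(-(u : Int) - 1) - 1).toNat = u := by omega
  rw [e1, e2]

theorem bxor_pp (u v : Nat) :
    PySem.Int.bxor (-(u : Int) - 1) (-(v : Int) - 1) = ((u ^^^ v : Nat) : Int) := by
  unfold PySem.Int.bxor
  rw [if_neg (by omega), if_neg (by omega)]
  have e1 : (-(-(u : Int) - 1) - 1).toNat = u := by omega
  have e2 : (-(-(v : Int) - 1) - 1).toNat = v := by omega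
  rw [e1, e2]

-- floor-mod / floor-div by 65536 on the two sign shapes
theorem int_mod_natCast' (u : Nat) :
    PySem.Int.mod (u : Int) 65536 = ((u % 65536 : Nat) : Int) := by
  rw [PySem.Int.mod_eq_emod_of_pos (by norm_num)]; omega

theorem int_div_natCast' (u : Nat) :
    PySem.Int.floordiv (u : Int) 65536 = ((u / 65536 : Nat) : Int) := by
  rw [PySem.Int.floordiv_eq_ediv_of_pos (by norm_num)]; omega

theorem int_mod_negSucc' (v : Nat) :
    PySem.Int.mod (-(v : Int) - 1) 65536 = 65535 - ((v % 65536 : Nat) : Int) := by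
  rw [PySem.Int.mod_eq_emod_of_pos (by norm_num)]; omega

theorem int_div_negSucc' (v : Nat) :
    PySem.Int.floordiv (-(v : Int) - 1) 65536 = -((v / 65536 : Nat) : Int) - 1 := by
  rw [PySem.Int.floordiv_eq_ediv_of_pos (by norm_num)]; omega

theorem int_shape (x : Int) : (∃ u : Nat, x = (u : Int)) ∨ (∃ u : Nat, x = -(u : Int) - 1) := by
  rcases le_or_gt 0 x with h | h
  · exact Or.inl ⟨x.toNat, by omega⟩
  · exact Or.inr ⟨(-x - 1).toNat, by omega⟩

-- XOR commutes with taking the low 16-bit word (floor-mod 65536)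
theorem mod_bxor (a b : Int) :
    PySem.Int.mod (PySem.Int.bxor a b) 65536 =
      PySem.Int.bxor (PySem.Int.mod a 65536) (PySem.Int.mod b 65536) := by
  have hm : ∀ n : Nat, n % 65536 < 65536 := fun n => Nat.mod_lt _ (by norm_num)
  have hcast : ∀ n : Nat, n < 65536 → (65535 : Int) - ((n : Nat) : Int) = ((65535 - n : Nat) : Int) := by
    intro n h; omega
  have hxm : ∀ u v : Nat, (u % 65536) ^^^ (65535 - v % 65536) = 65535 - ((u ^^^ v) % 65536) := by
    intro u v
    rw [← nat_not16 (v % 65536) (hm v), ← Nat.xor_assoc,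
      Nat.xor_comm (u % 65536) 65535, Nat.xor_assoc,
      show (65536 : Nat) = 2 ^ 16 from rfl, ← Nat.xor_mod_two_pow]
    exact nat_not16 _ (Nat.mod_lt _ (by norm_num))
  rcases int_shape a with ⟨u, rfl⟩ | ⟨u, rfl⟩ <;> rcases int_shape b with ⟨v, rfl⟩ | ⟨v, rfl⟩
  · rw [bxor_nn, int_mod_natCast', int_mod_natCast', int_mod_natCast', bxor_nn,
      show (65536 : Nat) = 2 ^ 16 from rfl, Nat.xor_mod_two_pow]
  · rw [bxor_np, int_mod_negSucc', int_mod_natCast', int_mod_negSucc',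
      hcast _ (hm v), bxor_nn, hxm u v]
    have := hm (u ^^^ v); omega
  · rw [bxor_pn, int_mod_negSucc', int_mod_negSucc', int_mod_natCast',
      hcast _ (hm u), bxor_nn, Nat.xor_comm (65535 - u % 65536), hxm v u,
      Nat.xor_comm v u]
    have := hm (u ^^^ v); omega
  · rw [bxor_pp, int_mod_natCast', int_mod_negSucc', int_mod_negSucc',
      hcast _ (hm u), hcast _ (hm v), bxor_nn]
    congr 1
    rw [← nat_not16 (u % 65536) (hm u), ← nat_not16 (v % 65536) (hm v),
      show (65535 ^^^ u % 65536) ^^^ (65535 ^^^ v % 65536)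
         = (65535 ^^^ 65535) ^^^ ((u % 65536) ^^^ (v % 65536)) by
        rw [Nat.xor_assoc, Nat.xor_assoc]
        congr 1
        rw [← Nat.xor_assoc, Nat.xor_comm (u % 65536) 65535, Nat.xor_assoc],
      Nat.xor_self, Nat.zero_xor, show (65536 : Nat) = 2 ^ 16 from rfl, Nat.xor_mod_two_pow]

-- XOR commutes with dropping the low 16-bit word (floor-div 65536)
theorem div_bxor (a b : Int) :
    PySem.Int.floordiv (PySem.Int.bxor a b) 65536 =
      PySem.Int.bxor (PySem.Int.floordiv a 65536) (PySem.Int.floordiv b 65536) := by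
  have hp : (65536 : Nat) = 2 ^ 16 := rfl
  rcases int_shape a with ⟨u, rfl⟩ | ⟨u, rfl⟩ <;> rcases int_shape b with ⟨v, rfl⟩ | ⟨v, rfl⟩
  · rw [bxor_nn, int_div_natCast', int_div_natCast', int_div_natCast', bxor_nn,
      hp, nat_xor_div_pow]
  · rw [bxor_np, int_div_negSucc', int_div_natCast', int_div_negSucc', bxor_np,
      hp, nat_xor_div_pow]
  · rw [bxor_pn, int_div_negSucc', int_div_negSucc', int_div_natCast', bxor_pn,
      hp, nat_xor_div_pow]
  · rw [bxor_pp, int_div_natCast', int_div_negSucc', int_div_negSucc', bxor_pp,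
      hp, nat_xor_div_pow]

-- masking with 0xFFFF is the floor-mod by 65536
theorem band_mask (x : Int) : PySem.Int.band x 65535 = PySem.Int.mod x 65536 := by
  rcases int_shape x with ⟨u, rfl⟩ | ⟨u, rfl⟩
  · rw [int_mod_natCast']
    unfold PySem.Int.band
    rw [if_pos (by positivity), if_pos (by norm_num)]
    have e1 : ((u : Int)).toNat = u := Int.toNat_natCast u
    have e2 : ((65535 : Int)).toNat = 65535 := rfl
    rw [e1, e2, show (65535 : Nat) = 2 ^ 16 - 1 from rfl, Nat.and_two_pow_sub_one_eq_mod]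
  · rw [int_mod_negSucc']
    unfold PySem.Int.band
    rw [if_neg (by omega), if_pos (by norm_num)]
    have e1 : ((65535 : Int)).toNat = 65535 := rfl
    have e2 : (-(-(u : Int) - 1) - 1).toNat = u := by omega
    rw [e1, e2, Nat.and_comm, show (65535 : Nat) = 2 ^ 16 - 1 from rfl,
      Nat.and_two_pow_sub_one_eq_mod]
    have := Nat.mod_lt u (show 0 < 2 ^ 16 by norm_num)
    omega

-- Python's arithmetic right shifts as iterated floor-divisions by 65536
theorem shr16 (x : Int) : x >>> (16 : Nat) = PySem.Int.floordiv x 65536 := by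
  rw [Int.shiftRight_eq_div_pow, PySem.Int.floordiv_eq_ediv_of_pos (by norm_num)]
  norm_num

theorem shr32 (x : Int) :
    x >>> (32 : Nat) = PySem.Int.floordiv (PySem.Int.floordiv x 65536) 65536 := by
  rw [Int.shiftRight_eq_div_pow, PySem.Int.floordiv_eq_ediv_of_pos (by norm_num),
    PySem.Int.floordiv_eq_ediv_of_pos (by norm_num),
    Int.ediv_ediv_of_nonneg (by norm_num)]
  norm_num

theorem shr48 (x : Int) :
    x >>> (48 : Nat) =
      PySem.Int.floordiv (PySem.Int.floordiv (PySem.Int.floordiv x 65536) 65536) 65536 := by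
  rw [Int.shiftRight_eq_div_pow, PySem.Int.floordiv_eq_ediv_of_pos (by norm_num),
    PySem.Int.floordiv_eq_ediv_of_pos (by norm_num),
    PySem.Int.floordiv_eq_ediv_of_pos (by norm_num),
    Int.ediv_ediv_of_nonneg (by norm_num), Int.ediv_ediv_of_nonneg (by norm_num)]
  norm_num

-- A's getWords, fully unfolded
theorem getWordsA_eval (b : Int) :
    getWordsA b =
      [PySem.Int.mod (PySem.Int.floordiv (PySem.Int.floordiv (PySem.Int.floordiv b 65536) 65536) 65536) 65536,
       PySem.Int.mod (PySem.Int.floordiv (PySem.Int.floordiv b 65536) 65536) 65536,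
       PySem.Int.mod (PySem.Int.floordiv b 65536) 65536,
       PySem.Int.mod b 65536] := by
  have hr : PySem.List.pyRange 0 4 1 = [0, 1, 2, 3] := by decide
  simp [getWordsA, hr, List.foldl]

-- pyGetD on a 4-element literal list (indices used by A's loop)
theorem getD4_0 (w x y z : Int) : PySem.List.pyGetD [w, x, y, z] 0 0 = w := rfl
theorem getD4_1 (w x y z : Int) : PySem.List.pyGetD [w, x, y, z] 1 0 = x := rfl
theorem getD4_2 (w x y z : Int) : PySem.List.pyGetD [w, x, y, z] 2 0 = y := rfl
theorem getD4_3 (w x y z : Int) : PySem.List.pyGetD [w, x, y, z] 3 0 = z := rfl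

theorem range_len4 (w x y z : Int) :
    PySem.List.pyRange 0 (([w, x, y, z] : List Int).length : Int) 1 = [0, 1, 2, 3] := by
  have h : (([w, x, y, z] : List Int).length : Int) = 4 := by simp
  rw [h]; decide

theorem shr0 (x : Int) : x >>> (0 : Nat) = x := by
  rw [Int.shiftRight_eq_div_pow]; norm_num

-- ===== VERDICT (by name: the statement is the Claim_ definition above) =====
theorem whitening_spec : Claim_equal_whitening := by
  intro block key _
  show whitening block key = whitening_alt block key
  simp only [whitening, whitening_alt, getWordsA_eval, range_len4, List.foldl, List.map,
    getD4_0, getD4_1, getD4_2, getD4_3, List.nil_append, List.cons_append]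
  rw [shr16 key, shr48, shr32,
    shr16 (PySem.Int.bxor block (PySem.Int.floordiv key 65536)), shr0,
    band_mask, band_mask, band_mask, band_mask,
    div_bxor, div_bxor, div_bxor, mod_bxor, mod_bxor, mod_bxor, mod_bxor]
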